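-- pv_equiv track=rewrite | github.com/mrzzy/csproblems | epi/chapter_4/computing_parity/solution.py | parity_divide_conquer
-- ===== SOURCE A (Python) =====
-- def parity_divide_conquer(word: int, n_bits: int = 64):
--     if n_bits <= 0:
--         return 0
--     if n_bits == 1:
--         return word & 1
--
--     # divide and conquer: divide into 2 sub words, compute sub word parity and combine into final result
--     n_half = n_bits // 2
--     n_half_mask = (1 << n_half) - 1
--
--     return parity_divide_conquer(word & n_half_mask, n_half) ^ parity_divide_conquer(
--         (word >> n_half) & n_half_mask, n_half
--     )
-- ===== SOURCE B (Python) =====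
-- def parity_divide_conquer(word: int, n_bits: int = 64):
--     if n_bits <= 0:
--         return 0
--     # iterative bit-folding: xor the upper half onto the lower half until one bit remains
--     while n_bits > 1:
--         half = n_bits // 2
--         word = (word ^ (word >> half)) & ((1 << half) - 1)
--         n_bits = half
--     return word & 1
-- ===== Notes on version B (the rewrite author's own statement) =====
-- stated objective: faster
-- what changed: Replaces A's binary-tree recursion (two recursive calls per level, O(n_bits) total work) by a single iterative loop that xor-folds the upper half of the word onto the lower half, halving the width each step (O(log n_bits) iterations).
import Mathlib
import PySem

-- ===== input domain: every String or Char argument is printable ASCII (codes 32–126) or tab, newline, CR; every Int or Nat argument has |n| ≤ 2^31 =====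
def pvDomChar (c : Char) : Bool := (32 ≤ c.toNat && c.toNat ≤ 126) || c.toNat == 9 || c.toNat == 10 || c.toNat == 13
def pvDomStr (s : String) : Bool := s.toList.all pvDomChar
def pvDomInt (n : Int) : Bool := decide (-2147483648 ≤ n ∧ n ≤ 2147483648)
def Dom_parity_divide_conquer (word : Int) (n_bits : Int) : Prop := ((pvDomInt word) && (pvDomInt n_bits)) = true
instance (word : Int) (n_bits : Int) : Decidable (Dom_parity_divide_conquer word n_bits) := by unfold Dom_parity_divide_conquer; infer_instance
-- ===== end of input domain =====

-- B replaces A's two-recursive-calls-per-level divide and conquer by a single iterative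
-- shift-xor folding loop (objective: faster — O(log n_bits) loop steps instead of O(n_bits) calls).

-- ===== PORT A =====
-- literal port of A; `word >> n_half` / `1 << n_half` use `.toNat` on the shift amount,
-- which is exact here since in that branch n_half = n_bits // 2 ≥ 1.
def parity_divide_conquer (word : Int) (n_bits : Int) : Int :=
  if n_bits ≤ 0 then 0
  else if n_bits = 1 then PySem.Int.band word 1
  else
    let n_half := PySem.Int.floordiv n_bits 2
    let n_half_mask := (1 : Int) <<< n_half.toNat - 1
    PySem.Int.bxor
      (parity_divide_conquer (PySem.Int.band word n_half_mask) n_half)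
      (parity_divide_conquer (PySem.Int.band ((word >>> n_half.toNat)) n_half_mask) n_half)
termination_by n_bits.toNat
decreasing_by
  all_goals
    rw [PySem.Int.floordiv_eq_ediv_of_pos (by omega : (0:Int) < 2)]
    omega

-- ===== PORT B =====
-- the while loop of Source B as a tail recursion over the same state (word, n_bits)
def pvAltLoop (word : Int) (n_bits : Int) : Int :=
  if n_bits > 1 then
    let half := PySem.Int.floordiv n_bits 2
    pvAltLoop (PySem.Int.band (PySem.Int.bxor word (word >>> half.toNat)) ((1 : Int) <<< half.toNat - 1)) half
  else PySem.Int.band word 1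
termination_by n_bits.toNat
decreasing_by
  rw [PySem.Int.floordiv_eq_ediv_of_pos (by omega : (0:Int) < 2)]
  omega

def parity_divide_conquer_alt (word : Int) (n_bits : Int) : Int :=
  if n_bits ≤ 0 then 0
  else pvAltLoop word n_bits

-- ===== PRECONDITION & SPEC =====
def Spec_parity_divide_conquer (word : Int) (n_bits : Int) (out : Int) : Prop := out = parity_divide_conquer_alt word n_bits
instance (word : Int) (n_bits : Int) (out : Int) : Decidable (Spec_parity_divide_conquer word n_bits out) := by unfold Spec_parity_divide_conquer; infer_instance

-- ===== CLAIM (what is proved, stated in full; the proofs are below) =====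
def Claim_equal_parity_divide_conquer : Prop := ∀ (word : Int) (n_bits : Int), Dom_parity_divide_conquer word n_bits → Spec_parity_divide_conquer word n_bits (parity_divide_conquer word n_bits)

-- ===== LEMMAS AND PROOFS =====

-- n - (n &&& m) = n.ldiff m on Nat (needed to relate PySem.Int.band to Int.land on mixed signs)
theorem pvNatSubAnd (n : Nat) : ∀ m : Nat, n - (n &&& m) = Nat.ldiff n m := by
  induction n using Nat.binaryRec with
  | zero => intro m; simp [Nat.ldiff]
  | bit b k ih =>
    intro m
    rw [← Nat.bit_testBit_zero_shiftRight_one m, Nat.land_bit, Nat.ldiff_bit]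
    have h1 := ih (m >>> 1)
    have h2 : k &&& (m >>> 1) ≤ k := Nat.and_le_left
    rw [Nat.bit_val, Nat.bit_val, Nat.bit_val]
    cases b <;> cases m.testBit 0 <;> simp <;> omega

theorem pvBandEqLand (a b : Int) : PySem.Int.band a b = Int.land a b := by
  cases a with
  | ofNat m =>
    cases b with
    | ofNat n => simp [PySem.Int.band, Int.land]
    | negSucc n =>
      simp [PySem.Int.band, Int.land, Int.negSucc_eq]
      rw [if_neg (by omega : ¬ ((n : Int) ≤ -1))]
      exact congrArg Int.ofNat (pvNatSubAnd m n)
  | negSucc m =>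
    cases b with
    | ofNat n =>
      simp [PySem.Int.band, Int.land, Int.negSucc_eq]
      rw [if_neg (by omega : ¬ ((m : Int) ≤ -1))]
      exact congrArg Int.ofNat (pvNatSubAnd n m)
    | negSucc n =>
      simp [PySem.Int.band, Int.land, Int.negSucc_eq]
      rw [if_neg (by omega : ¬ ((m : Int) ≤ -1)), if_neg (by omega : ¬ ((n : Int) ≤ -1))]
      omega

theorem pvBxorEqXor (a b : Int) : PySem.Int.bxor a b = Int.xor a b := by
  cases a with
  | ofNat m =>
    cases b with
    | ofNat n => simp [PySem.Int.bxor, Int.xor]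
    | negSucc n =>
      simp [PySem.Int.bxor, Int.xor, Int.negSucc_eq]
      rw [if_neg (by omega : ¬ ((n : Int) ≤ -1))]
      omega
  | negSucc m =>
    cases b with
    | ofNat n =>
      simp [PySem.Int.bxor, Int.xor, Int.negSucc_eq]
      rw [if_neg (by omega : ¬ ((m : Int) ≤ -1))]
      omega
    | negSucc n =>
      simp [PySem.Int.bxor, Int.xor, Int.negSucc_eq]
      rw [if_neg (by omega : ¬ ((m : Int) ≤ -1)), if_neg (by omega : ¬ ((n : Int) ≤ -1))]

-- extensionality on bits for Int
theorem pvIntTestBitExt {x y : Int} (h : ∀ k, x.testBit k = y.testBit k) : x = y := by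
  cases x with
  | ofNat m =>
    cases y with
    | ofNat n => exact congrArg Int.ofNat (Nat.eq_of_testBit_eq fun i => by simpa [Int.testBit] using h i)
    | negSucc n =>
      exfalso
      have hk := h (m + n)
      have hm : m.testBit (m + n) = false :=
        Nat.testBit_lt_two_pow (lt_of_lt_of_le (Nat.lt_two_pow_self) (Nat.pow_le_pow_right (by omega) (by omega)))
      have hn : n.testBit (m + n) = false :=
        Nat.testBit_lt_two_pow (lt_of_lt_of_le (Nat.lt_two_pow_self) (Nat.pow_le_pow_right (by omega) (by omega)))
      simp [Int.testBit, hm, hn] at hk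
  | negSucc m =>
    cases y with
    | ofNat n =>
      exfalso
      have hk := h (m + n)
      have hm : m.testBit (m + n) = false :=
        Nat.testBit_lt_two_pow (lt_of_lt_of_le (Nat.lt_two_pow_self) (Nat.pow_le_pow_right (by omega) (by omega)))
      have hn : n.testBit (m + n) = false :=
        Nat.testBit_lt_two_pow (lt_of_lt_of_le (Nat.lt_two_pow_self) (Nat.pow_le_pow_right (by omega) (by omega)))
      simp [Int.testBit, hm, hn] at hk
    | negSucc n =>
      exact congrArg Int.negSucc (Nat.eq_of_testBit_eq fun i => by
        have := h i; simp [Int.testBit] at this; exact this)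

theorem pvIntTestBitShiftRight (x : Int) (k j : Nat) : (x >>> k).testBit j = x.testBit (k + j) := by
  cases x with
  | ofNat m =>
    rw [show (Int.ofNat m) >>> k = Int.ofNat (m >>> k) from Int.natCast_shiftRight m k]
    simp [Int.testBit, Nat.testBit_shiftRight]
  | negSucc m =>
    rw [show (Int.negSucc m) >>> k = Int.negSucc (m >>> k) from Int.negSucc_shiftRight m k]
    simp [Int.testBit, Nat.testBit_shiftRight]

-- masking distributes over xor
theorem pvBandBxorDistrib (x y m : Int) :
    PySem.Int.band (PySem.Int.bxor x y) m = PySem.Int.bxor (PySem.Int.band x m) (PySem.Int.band y m) := by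
  apply pvIntTestBitExt
  intro k
  simp [pvBandEqLand, pvBxorEqXor, Int.testBit_land, Int.testBit_lxor]
  cases x.testBit k <;> cases y.testBit k <;> cases m.testBit k <;> rfl

-- shifting distributes over xor
theorem pvShiftBxor (x y : Int) (k : Nat) :
    (PySem.Int.bxor x y) >>> k = PySem.Int.bxor (x >>> k) (y >>> k) := by
  apply pvIntTestBitExt
  intro j
  simp [pvBxorEqXor, pvIntTestBitShiftRight, Int.testBit_lxor]

-- xor of four terms can be regrouped pairwise
theorem pvBxorShuffle (a b c d : Int) :
    PySem.Int.bxor (PySem.Int.bxor a b) (PySem.Int.bxor c d)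
      = PySem.Int.bxor (PySem.Int.bxor a c) (PySem.Int.bxor b d) := by
  apply pvIntTestBitExt
  intro k
  simp [pvBxorEqXor, Int.testBit_lxor]
  cases a.testBit k <;> cases b.testBit k <;> cases c.testBit k <;> cases d.testBit k <;> rfl

-- A is GF(2)-linear in its word argument
theorem pvLin (fuel : Nat) : ∀ (h : Int), h.toNat ≤ fuel → 1 ≤ h → ∀ x y : Int,
    PySem.Int.bxor (parity_divide_conquer x h) (parity_divide_conquer y h)
      = parity_divide_conquer (PySem.Int.bxor x y) h := by
  induction fuel with
  | zero => intro h hf h1; omega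
  | succ f ih =>
    intro h hf h1 x y
    by_cases he : h = 1
    · subst he
      rw [parity_divide_conquer, parity_divide_conquer, parity_divide_conquer]
      simp only [if_neg (by omega : ¬ (1:Int) ≤ 0)]
      exact (pvBandBxorDistrib x y 1).symm
    · have h2 : 2 ≤ h := by omega
      have hq : PySem.Int.floordiv h 2 = h / 2 := PySem.Int.floordiv_eq_ediv_of_pos (by omega)
      have hq1 : 1 ≤ PySem.Int.floordiv h 2 := by rw [hq]; omega
      have hqf : (PySem.Int.floordiv h 2).toNat ≤ f := by rw [hq]; omega
      conv_lhs => rw [parity_divide_conquer, parity_divide_conquer]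
      conv_rhs => rw [parity_divide_conquer]
      simp only [if_neg (by omega : ¬ h ≤ 0), if_neg he]
      rw [pvBxorShuffle]
      rw [ih _ hqf hq1, ih _ hqf hq1]
      rw [← pvBandBxorDistrib, ← pvBandBxorDistrib, ← pvShiftBxor]

-- the recursion of A computes exactly one pass of B's folding loop per level
theorem pvMain (fuel : Nat) : ∀ (n : Int), n.toNat ≤ fuel → 1 ≤ n → ∀ w : Int,
    parity_divide_conquer w n = pvAltLoop w n := by
  induction fuel with
  | zero => intro n hf h1; omega
  | succ f ih =>
    intro n hf h1 w
    by_cases he : n = 1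
    · subst he
      rw [parity_divide_conquer, pvAltLoop]
      simp
    · have h2 : 2 ≤ n := by omega
      have hq : PySem.Int.floordiv n 2 = n / 2 := PySem.Int.floordiv_eq_ediv_of_pos (by omega)
      have hq1 : 1 ≤ PySem.Int.floordiv n 2 := by rw [hq]; omega
      have hqf : (PySem.Int.floordiv n 2).toNat ≤ f := by rw [hq]; omega
      rw [parity_divide_conquer, pvAltLoop]
      simp only [if_neg (by omega : ¬ n ≤ 0), if_neg he, if_pos (by omega : n > 1)]
      rw [pvLin f _ hqf hq1]
      rw [← pvBandBxorDistrib]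
      exact ih _ hqf hq1 _

-- ===== VERDICT (by name: the statement is the Claim_ definition above) =====
theorem parity_divide_conquer_spec : Claim_equal_parity_divide_conquer := by
  intro word n_bits _
  unfold Spec_parity_divide_conquer parity_divide_conquer_alt
  by_cases h : n_bits ≤ 0
  · rw [parity_divide_conquer]; simp [h]
  · simp only [if_neg h]
    exact pvMain n_bits.toNat n_bits (le_refl _) (by omega) word
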